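-- pv_equiv track=rewrite | github.com/Wayslit/IDB-FOIL | model/FOIL_Bird.py | get_new_total_list1
-- ===== SOURCE A (Python) =====
-- import math,re,copy,json,time,random,yaml,os
--
-- def get_new_total_list1(result_list,total_list):
--     del_number_hd=[]
--     new_total=copy.deepcopy(total_list)
--     for clauses_list in result_list:
--         for image_number,image in enumerate(total_list):
--             del_result=True
--             for clause in clauses_list:
--                 if (clause not in image):
--                     del_result=False
--                     break
--             if del_result==True:
--                 del_number_hd.append(image_number)
--     del_number=list(set(del_number_hd))
--     del_number.sort()
--     for i in range(len(del_number)):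
--         del new_total[del_number[len(del_number)-1-i]]
--     return new_total
-- ===== SOURCE B (Python) =====
-- import copy
--
-- def get_new_total_list1(result_list, total_list):
--     new_total = []
--     for image in total_list:
--         if not any(all(clause in image for clause in clauses_list)
--                    for clauses_list in result_list):
--             new_total.append(copy.deepcopy(image))
--     return new_total
-- ===== Notes on version B (the rewrite author's own statement) =====
-- stated objective: simpler
-- what changed: Replaces A's index-collection over all clause-sets plus set-dedup, sort and reverse-order deletion with a single forward filter pass: keep an image iff no clause-set is fully contained in it.
import Mathlib
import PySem

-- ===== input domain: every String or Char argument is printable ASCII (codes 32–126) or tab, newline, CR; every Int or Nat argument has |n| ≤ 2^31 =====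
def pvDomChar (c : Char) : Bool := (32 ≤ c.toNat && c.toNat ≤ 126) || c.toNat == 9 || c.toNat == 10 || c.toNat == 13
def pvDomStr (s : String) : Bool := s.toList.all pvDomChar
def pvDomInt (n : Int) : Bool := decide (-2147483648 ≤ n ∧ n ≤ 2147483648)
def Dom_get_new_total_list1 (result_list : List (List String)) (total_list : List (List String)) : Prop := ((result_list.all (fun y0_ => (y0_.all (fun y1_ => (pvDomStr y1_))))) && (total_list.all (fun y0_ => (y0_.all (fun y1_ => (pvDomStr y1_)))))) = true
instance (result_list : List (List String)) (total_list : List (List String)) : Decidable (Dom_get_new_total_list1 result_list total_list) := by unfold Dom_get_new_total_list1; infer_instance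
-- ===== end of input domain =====

-- B is a one-pass forward filter replacing A's index collection + set dedup + sort + reverse deletion (simpler); return value only — deepcopy is identity on immutable Lean values.

-- ===== PORT A =====
-- inner 'for clause in clauses_list: if clause not in image: del_result=False; break'
def pvInnerA (clauses_list : List String) (image : List String) : Bool :=
  match clauses_list with
  | [] => true
  | c :: cs => if !(image.contains c) then false else pvInnerA cs image

-- 'del new_total[d]' on a valid index (match on pop?; the none branch is unreachable for the indices A uses)
def pvDel1 (nt : List (List String)) (d : Int) : List (List String) :=
  match PySem.List.pop? nt d with
  | some r => r.2
  | none => nt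

def get_new_total_list1 (result_list : List (List String)) (total_list : List (List String)) : List (List String) :=
  let del_number_hd : List Int :=
    result_list.foldl (fun acc clauses_list =>
      (PySem.List.enumerate total_list 0).foldl (fun acc p =>
        if pvInnerA clauses_list p.2 then acc ++ [p.1] else acc) acc) []
  let new_total := total_list  -- copy.deepcopy(total_list)
  let del_number := PySem.List.sorted (PySem.Set.ofList del_number_hd) (fun x => x) false
  (List.range del_number.length).foldl (fun nt i =>
    pvDel1 nt (del_number.getD (del_number.length - 1 - i) (-1))) new_total

-- ===== PORT B =====
-- 'any(all(clause in image for clause in clauses_list) for clauses_list in result_list)'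
def pvMatches (result_list : List (List String)) (image : List String) : Bool :=
  result_list.any (fun clauses_list => clauses_list.all (fun clause => image.contains clause))

def get_new_total_list1_alt (result_list : List (List String)) (total_list : List (List String)) : List (List String) :=
  total_list.foldl (fun acc image =>
    if !pvMatches result_list image then acc ++ [image] else acc) []

-- ===== PRECONDITION & SPEC =====
def Spec_get_new_total_list1 (result_list : List (List String)) (total_list : List (List String)) (out : List (List String)) : Prop := out = get_new_total_list1_alt result_list total_list
instance (result_list : List (List String)) (total_list : List (List String)) (out : List (List String)) : Decidable (Spec_get_new_total_list1 result_list total_list out) := by unfold Spec_get_new_total_list1; infer_instance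

-- ===== CLAIM (what is proved, stated in full; the proofs are below) =====
def Claim_equal_get_new_total_list1 : Prop := ∀ (result_list : List (List String)) (total_list : List (List String)), Dom_get_new_total_list1 result_list total_list → Spec_get_new_total_list1 result_list total_list (get_new_total_list1 result_list total_list)

-- ===== LEMMAS AND PROOFS =====

-- the canonical deletion index list: positions of images matching some clause-set
def pvE (result_list : List (List String)) (tl : List (List String)) (s : Int) : List Int :=
  ((PySem.List.enumerate tl s).filter (fun p => pvMatches result_list p.2)).map (fun p => p.1)

theorem pvInnerA_eq_all (cs image : List String) :
    pvInnerA cs image = cs.all (fun c => image.contains c) := by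
  induction cs with
  | nil => rfl
  | cons c cs ih =>
    simp only [pvInnerA, List.all_cons, ih]
    rcases image.contains c with _ | _ <;> simp

theorem pvE_pairwise (rl tl : List (List String)) (s : Int) :
    (pvE rl tl s).Pairwise (· < ·) := by
  unfold pvE
  exact ((PySem.List.pairwise_lt_enumerate tl s).filter _).map _ (fun a b h => h)

theorem pvE_nodup (rl tl : List (List String)) (s : Int) : (pvE rl tl s).Nodup :=
  (pvE_pairwise rl tl s).imp (fun h => ne_of_lt h)

theorem mem_pvE (rl tl : List (List String)) (s d : Int) :
    d ∈ pvE rl tl s ↔ ∃ p ∈ PySem.List.enumerate tl s, pvMatches rl p.2 = true ∧ d = p.1 := by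
  unfold pvE
  simp only [List.mem_map, List.mem_filter]
  constructor
  · rintro ⟨p, ⟨hp, hm⟩, rfl⟩; exact ⟨p, hp, hm, rfl⟩
  · rintro ⟨p, hp, hm, rfl⟩; exact ⟨p, ⟨hp, hm⟩, rfl⟩

theorem pvHd_eq (rl tl : List (List String)) :
    (rl.foldl (fun acc clauses_list =>
      (PySem.List.enumerate tl 0).foldl (fun acc p =>
        if pvInnerA clauses_list p.2 then acc ++ [p.1] else acc) acc) []) =
    rl.flatMap (fun cl => ((PySem.List.enumerate tl 0).filter (fun p => pvInnerA cl p.2)).map (fun p => p.1)) := by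
  simp only [PySem.List.foldl_append_if, PySem.List.foldl_append_eq_flatMap]
  simp

theorem mem_pvHd (rl tl : List (List String)) (d : Int) :
    d ∈ (rl.flatMap (fun cl => ((PySem.List.enumerate tl 0).filter (fun p => pvInnerA cl p.2)).map (fun p => p.1))) ↔ d ∈ pvE rl tl 0 := by
  simp only [List.mem_flatMap, List.mem_map, List.mem_filter, mem_pvE, pvMatches,
    pvInnerA_eq_all, List.any_eq_true]
  constructor
  · rintro ⟨cl, hcl, p, ⟨hp, hall⟩, rfl⟩; exact ⟨p, hp, ⟨cl, hcl, hall⟩, rfl⟩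
  · rintro ⟨p, hp, ⟨cl, hcl, hall⟩, rfl⟩; exact ⟨cl, hcl, p, ⟨hp, hall⟩, rfl⟩

theorem pvSorted_eq (rl tl : List (List String)) :
    PySem.List.sorted (PySem.Set.ofList (rl.flatMap (fun cl => ((PySem.List.enumerate tl 0).filter (fun p => pvInnerA cl p.2)).map (fun p => p.1)))) (fun x => x) false = pvE rl tl 0 := by
  apply PySem.List.sorted_eq_of_perm_of_pairwise_lt
  · rw [List.perm_ext_iff_of_nodup (pvE_nodup rl tl 0) (PySem.Set.nodup_ofList _)]
    intro d
    rw [PySem.Set.mem_ofList, mem_pvHd]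
  · exact pvE_pairwise rl tl 0

-- reverse-index access loop = foldr over the list
theorem pvRangeFold_eq_foldr (D : List Int) (xs : List (List String)) :
    (List.range D.length).foldl (fun nt i => pvDel1 nt (D.getD (D.length - 1 - i) (-1))) xs
      = D.foldr (fun d nt => pvDel1 nt d) xs := by
  have hmap : (List.range D.length).map (fun i => D.getD (D.length - 1 - i) (-1)) = D.reverse := by
    apply List.ext_getElem
    · simp
    · intro i h1 h2
      have hi : i < D.length := by simpa using h1
      have hlt : D.length - 1 - i < D.length := by omega
      simp only [List.getElem_map, List.getElem_range, List.getElem_reverse]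
      rw [List.getD_eq_getElem _ _ hlt]
  calc (List.range D.length).foldl (fun nt i => pvDel1 nt (D.getD (D.length - 1 - i) (-1))) xs
      = ((List.range D.length).map (fun i => D.getD (D.length - 1 - i) (-1))).foldl pvDel1 xs := by
        rw [List.foldl_map]
    _ = D.reverse.foldl pvDel1 xs := by rw [hmap]
    _ = D.foldr (fun d nt => pvDel1 nt d) xs := List.foldl_reverse

theorem pvDel1_cons (x : List String) (t : List (List String)) (d : Int) (hd : 1 ≤ d) :
    pvDel1 (x :: t) d = x :: pvDel1 t (d - 1) := by
  obtain ⟨k, rfl⟩ : ∃ k : Nat, d = (k : Int) + 1 := ⟨(d - 1).toNat, by omega⟩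
  by_cases h : k < t.length
  · have h1 : k + 1 < (x :: t).length := by simpa using Nat.succ_lt_succ h
    have e1 : ((k : Int) + 1) = ((k + 1 : Nat) : Int) := by omega
    have e2 : ((k : Int) + 1 - 1) = ((k : Nat) : Int) := by omega
    rw [pvDel1, pvDel1, e2, PySem.List.pop?_natCast t k h, e1, PySem.List.pop?_natCast _ _ h1]
    simp
  · have h1 : PySem.List.pop? (x :: t) ((k : Int) + 1) = none := by
      simp only [PySem.List.pop?, PySem.List.pyIdx?, List.length_cons]
      split_ifs <;> first | rfl | omega
    have h2 : PySem.List.pop? t ((k : Int) + 1 - 1) = none := by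
      simp only [PySem.List.pop?, PySem.List.pyIdx?]
      split_ifs <;> first | rfl | omega
    rw [pvDel1, h1, pvDel1, h2]

theorem pvShiftDel (D : List Int) (hD : ∀ d ∈ D, 1 ≤ d) (x : List String) (t : List (List String)) :
    D.foldr (fun d nt => pvDel1 nt d) (x :: t)
      = x :: (D.map (fun d => d - 1)).foldr (fun d nt => pvDel1 nt d) t := by
  induction D with
  | nil => simp
  | cons d D' ih =>
    simp only [List.foldr_cons, List.map_cons]
    rw [ih (fun e he => hD e (List.mem_cons_of_mem _ he)),
        pvDel1_cons _ _ _ (hD d List.mem_cons_self)]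

theorem pvE_shift (rl tl : List (List String)) (s : Int) :
    pvE rl tl (s + 1) = (pvE rl tl s).map (fun d => d + 1) := by
  induction tl generalizing s with
  | nil => simp [pvE, PySem.List.enumerate_nil]
  | cons x t ih =>
    simp only [pvE, PySem.List.enumerate_cons, List.filter_cons] at *
    by_cases h : pvMatches rl x = true <;> simp [h, ih (s + 1)]

theorem pvE_nonneg (rl tl : List (List String)) (d : Int) (h : d ∈ pvE rl tl 0) : 0 ≤ d := by
  rw [mem_pvE] at h
  obtain ⟨p, hp, _, rfl⟩ := h
  rw [PySem.List.mem_enumerate_iff] at hp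
  obtain ⟨k, hk, rfl⟩ := hp
  simp

theorem pvFoldrDel (rl tl : List (List String)) :
    (pvE rl tl 0).foldr (fun d nt => pvDel1 nt d) tl = tl.filter (fun x => !pvMatches rl x) := by
  induction tl with
  | nil => simp [pvE, PySem.List.enumerate_nil]
  | cons x t ih =>
    have hE : pvE rl (x :: t) 0
        = (if pvMatches rl x then [(0 : Int)] else []) ++ (pvE rl t 0).map (fun d => d + 1) := by
      have := pvE_shift rl t 0
      simp only [pvE, PySem.List.enumerate_cons, List.filter_cons] at *
      by_cases h : pvMatches rl x = true <;> simp [h, zero_add] at * <;> simp [this]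
    rw [hE, List.foldr_append]
    have hsh : ((pvE rl t 0).map (fun d => d + 1)).foldr (fun d nt => pvDel1 nt d) (x :: t)
        = x :: (pvE rl t 0).foldr (fun d nt => pvDel1 nt d) t := by
      rw [pvShiftDel _ (by
        intro d hd
        obtain ⟨e, he, rfl⟩ := List.mem_map.mp hd
        have := pvE_nonneg rl t e he
        omega)]
      rw [List.map_map,
        show ((fun d => d - 1) ∘ fun d => d + 1) = (id : Int → Int) from funext fun d => by simp,
        List.map_id]
    rw [hsh, ih]
    by_cases h : pvMatches rl x = true
    · simp [h, pvDel1, PySem.List.pop?_zero_cons]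
    · simp [h]

theorem pvAlt_eq_filter (rl tl : List (List String)) :
    get_new_total_list1_alt rl tl = tl.filter (fun x => !pvMatches rl x) := by
  unfold get_new_total_list1_alt
  simpa using PySem.List.foldl_append_if_eq_filter (fun x => !pvMatches rl x) tl []

-- ===== VERDICT (by name: the statement is the Claim_ definition above) =====
theorem get_new_total_list1_spec : Claim_equal_get_new_total_list1 := by
  intro rl tl _
  unfold Spec_get_new_total_list1
  simp only [get_new_total_list1]
  rw [pvHd_eq, pvSorted_eq, pvRangeFold_eq_foldr, pvFoldrDel, pvAlt_eq_filter]
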